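-- pv_equiv track=rewrite | github.com/TalanLabs/kata-phone-number | python/phone_number.py | count_elements_rec
-- ===== SOURCE A (Python) =====
-- from typing import List
--
-- PhoneNumber = str
--
-- def count_elements_rec(numbers: List[PhoneNumber], count: int = 0) -> int:
--     dict_numbers = dict()
--
--     for num in numbers:
--         if len(num) > 0 and num[0]  not in dict_numbers.keys():
--             dict_numbers.update({num[0]: [num[1:]]})
--             count += 1
--         elif len(num) > 0 and num[0] in dict_numbers.keys():
--             dict_numbers[num[0]].append(num[1:])
--
--     for key, value in dict_numbers.items():
--         if dict_numbers[key] != ['']: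
--             count += count_elements_rec(value)
--     return count
-- ===== SOURCE B (Python) =====
-- def count_elements_rec(numbers, count=0):
--     prefixes = {n[:i] for n in numbers for i in range(1, len(n) + 1)}
--     return count + len(prefixes)
-- ===== Notes on version B (the rewrite author's own statement) =====
-- stated objective: simpler
-- what changed: A's recursive per-first-character dict grouping is replaced by a single set comprehension collecting every non-empty prefix and returning count plus the set's size.
import Mathlib
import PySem

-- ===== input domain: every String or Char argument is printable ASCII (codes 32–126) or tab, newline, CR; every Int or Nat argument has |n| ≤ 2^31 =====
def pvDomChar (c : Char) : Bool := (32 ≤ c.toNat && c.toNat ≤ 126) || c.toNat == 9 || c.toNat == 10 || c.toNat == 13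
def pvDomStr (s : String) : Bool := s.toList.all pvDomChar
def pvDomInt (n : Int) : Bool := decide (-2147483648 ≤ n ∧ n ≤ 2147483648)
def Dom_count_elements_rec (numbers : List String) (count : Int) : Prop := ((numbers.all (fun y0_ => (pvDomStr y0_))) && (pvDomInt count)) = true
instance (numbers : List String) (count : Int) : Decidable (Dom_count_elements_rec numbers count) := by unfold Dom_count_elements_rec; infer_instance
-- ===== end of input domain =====

-- B replaces A's recursive per-first-character dict grouping by a single set comprehension
-- collecting all non-empty prefixes; objective: simpler (one pass building a set, no recursion).


-- ===== PORT A =====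
-- Strings are represented internally as their char lists (the PySem convention for string
-- contents: num[0] is the head, num[1:] the tail of the list). The recursion is run with a
-- fuel counter = total length + 1, which pvCountA_eq below proves sufficient; the fuel
-- guard only makes the same computation total.
def pvSumLen (ns : List (List Char)) : Nat := (ns.map List.length).sum

def pvCountA : Nat → List (List Char) → Int → Int
  | 0, _, count => count        -- never reached when fuel > pvSumLen numbers
  | fuel+1, numbers, count =>
    -- first loop: build dict_numbers (keys: first chars) and bump count on fresh keys
    let st := numbers.foldl
      (fun (st : PySem.Dict Char (List (List Char)) × Int) num =>
        match num with
        | [] => st                          -- len(num) == 0: neither branch fires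
        | c :: rest =>                      -- c = num[0], rest = num[1:]
          if st.1.contains c = false then
            (st.1.insert c [rest], st.2 + 1)
          else
            -- dict_numbers[num[0]].append(num[1:])
            (st.1.modify c [] (fun v => v ++ [rest]), st.2))
      (PySem.Dict.empty, count)
    -- second loop over items; dict_numbers[key] is exactly kv.2 (keys are unique)
    st.1.items.foldl
      (fun cnt kv => if kv.2 ≠ [([] : List Char)] then cnt + pvCountA fuel kv.2 0 else cnt)
      st.2

def count_elements_rec (numbers : List String) (count : Int) : Int :=
  pvCountA (pvSumLen (numbers.map String.toList) + 1) (numbers.map String.toList) count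

-- ===== PORT B =====
-- Source B: prefixes = {n[:i] for n in numbers for i in range(1, len(n) + 1)}; return count + len(prefixes)
def count_elements_rec_alt (numbers : List String) (count : Int) : Int :=
  let prefixes : PySem.Set (List Char) :=
    PySem.Set.ofList (numbers.flatMap (fun n =>
      (PySem.List.pyRange 1 (PySem.Str.len n + 1)).map
        (fun i => PySem.List.slice n.toList none (some i))))
  count + prefixes.length

-- ===== PRECONDITION & SPEC =====
def Spec_count_elements_rec (numbers : List String) (count : Int) (out : Int) : Prop := out = count_elements_rec_alt numbers count
instance (numbers : List String) (count : Int) (out : Int) : Decidable (Spec_count_elements_rec numbers count out) := by unfold Spec_count_elements_rec; infer_instance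

-- ===== CLAIM (what is proved, stated in full; the proofs are below) =====
def Claim_equal_count_elements_rec : Prop := ∀ (numbers : List String) (count : Int), Dom_count_elements_rec numbers count → Spec_count_elements_rec numbers count (count_elements_rec numbers count)

-- ===== LEMMAS AND PROOFS =====

-- The finite set of non-empty prefixes of one char list / of all members of a list.
def pvPfx (s : List Char) : Finset (List Char) :=
  ((List.range s.length).map (fun i => s.take (i+1))).toFinset

def pvPfxs (ns : List (List Char)) : Finset (List Char) :=
  ns.foldr (fun s acc => pvPfx s ∪ acc) ∅

lemma mem_pvPfx {p s : List Char} : p ∈ pvPfx s ↔ p ≠ [] ∧ p <+: s := by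
  simp only [pvPfx, List.mem_toFinset, List.mem_map, List.mem_range]
  constructor
  · rintro ⟨i, hi, rfl⟩
    refine ⟨?_, List.take_prefix _ _⟩
    intro h
    rcases List.take_eq_nil_iff.mp h with h' | h'
    · omega
    · subst h'; simp at hi
  · rintro ⟨hne, hp⟩
    refine ⟨p.length - 1, ?_, ?_⟩
    · have := hp.length_le
      have : p.length ≠ 0 := by simpa [List.length_eq_zero_iff] using hne
      omega
    · have h1 : p.length - 1 + 1 = p.length := by
        have : p.length ≠ 0 := by simpa [List.length_eq_zero_iff] using hne
        omega
      rw [h1, ← List.prefix_iff_eq_take.mp hp]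

lemma mem_pvPfxs {p : List Char} {ns : List (List Char)} :
    p ∈ pvPfxs ns ↔ p ≠ [] ∧ ∃ s ∈ ns, p <+: s := by
  induction ns with
  | nil => simp [pvPfxs]
  | cons s ns ih =>
    simp only [pvPfxs, List.foldr_cons, Finset.mem_union, mem_pvPfx] at *
    rw [ih]
    constructor
    · rintro (⟨h1, h2⟩ | ⟨h1, t, ht, hp⟩)
      · exact ⟨h1, s, by simp, h2⟩
      · exact ⟨h1, t, by simp [ht], hp⟩
    · rintro ⟨h1, t, ht, hp⟩
      rcases List.mem_cons.mp ht with rfl | ht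
      · exact Or.inl ⟨h1, hp⟩
      · exact Or.inr ⟨h1, t, ht, hp⟩

def pvPairs (ns : List (List Char)) : List (Char × List Char) :=
  ns.filterMap (fun s => match s with | [] => none | c :: t => some (c, t))

def pvHeads (ns : List (List Char)) : List Char := (pvPairs ns).map (·.1)

def pvGroup (ns : List (List Char)) (c : Char) : List (List Char) :=
  (((pvPairs ns).filter (fun p => p.1 == c)).map (·.2))

lemma mem_pvPairs {c : Char} {t : List Char} {ns : List (List Char)} :
    (c, t) ∈ pvPairs ns ↔ (c :: t) ∈ ns := by
  simp only [pvPairs, List.mem_filterMap]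
  constructor
  · rintro ⟨s, hs, h⟩
    match s with
    | [] => simp at h
    | a :: u => simp at h; obtain ⟨rfl, rfl⟩ := h; exact hs
  · intro h; exact ⟨c :: t, h, rfl⟩

lemma mem_pvGroup {t : List Char} {ns : List (List Char)} {c : Char} :
    t ∈ pvGroup ns c ↔ (c, t) ∈ pvPairs ns := by
  simp only [pvGroup, List.mem_map, List.mem_filter]
  constructor
  · rintro ⟨⟨a, b⟩, ⟨hp, he⟩, rfl⟩
    simp only [beq_iff_eq] at he; subst he; exact hp
  · intro h; exact ⟨(c, t), ⟨h, by simp⟩, rfl⟩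

def pvG (ns : List (List Char)) (c : Char) : Finset (List Char) :=
  insert [c] ((pvPfxs (pvGroup ns c)).image (c :: ·))

lemma mem_pvG_head {ns : List (List Char)} {c : Char} {x : List Char} (h : x ∈ pvG ns c) :
    x.head? = some c := by
  rcases Finset.mem_insert.mp h with rfl | h
  · rfl
  · obtain ⟨q, _, rfl⟩ := Finset.mem_image.mp h; rfl

lemma pvPfxs_eq_biUnion (ns : List (List Char)) :
    pvPfxs ns = (pvHeads ns).toFinset.biUnion (pvG ns) := by
  ext p
  rw [mem_pvPfxs]
  simp only [Finset.mem_biUnion, List.mem_toFinset, pvHeads, List.mem_map]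
  constructor
  · rintro ⟨hne, s, hs, hp⟩
    match s, p, hp with
    | _, [], _ => exact absurd rfl hne
    | c :: t, q :: qs, hp =>
      obtain ⟨hq, hqs⟩ : q = c ∧ qs <+: t := by
        obtain ⟨r, hr⟩ := hp
        simp only [List.cons_append] at hr
        injection hr with h1 h2
        exact ⟨h1, ⟨r, h2⟩⟩
      subst hq
      refine ⟨q, ⟨(q, t), mem_pvPairs.mpr hs, rfl⟩, ?_⟩
      rcases eq_or_ne qs [] with rfl | hqs'
      · exact Finset.mem_insert_self _ _
      · refine Finset.mem_insert_of_mem (Finset.mem_image.mpr ⟨qs, ?_, rfl⟩)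
        exact mem_pvPfxs.mpr ⟨hqs', t, mem_pvGroup.mpr (mem_pvPairs.mpr hs), hqs⟩
  · rintro ⟨c, ⟨⟨a, t⟩, hpair, rfl⟩, hmem⟩
    simp only at hmem
    rcases Finset.mem_insert.mp hmem with rfl | h
    · exact ⟨by simp, a :: t, mem_pvPairs.mp hpair, ⟨t, rfl⟩⟩
    · obtain ⟨q, hq, rfl⟩ := Finset.mem_image.mp h
      obtain ⟨hqne, u, hu, hqu⟩ := mem_pvPfxs.mp hq
      exact ⟨by simp, a :: u, mem_pvPairs.mp (mem_pvGroup.mp hu),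
        by obtain ⟨r, hr⟩ := hqu; exact ⟨r, by simp [← hr]⟩⟩

lemma pvG_card (ns : List (List Char)) (c : Char) :
    (pvG ns c).card = 1 + (pvPfxs (pvGroup ns c)).card := by
  rw [pvG, Finset.card_insert_of_notMem, Finset.card_image_of_injective _ (List.cons_injective (a := c)), Nat.add_comm]
  intro h
  obtain ⟨q, hq, he⟩ := Finset.mem_image.mp h
  have := (mem_pvPfxs.mp hq).1
  injection he with h1 h2
  exact this h2

lemma pvPfxs_card (ns : List (List Char)) :
    (pvPfxs ns).card
      = (PySem.Set.ofList (pvHeads ns)).length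
        + ((PySem.Set.ofList (pvHeads ns)).map (fun c => (pvPfxs (pvGroup ns c)).card)).sum := by
  have hnd := PySem.Set.nodup_ofList (xs := pvHeads ns)
  have hfs : (pvHeads ns).toFinset = (PySem.Set.ofList (pvHeads ns)).toFinset := by
    ext c; simp [PySem.Set.mem_ofList]
  rw [pvPfxs_eq_biUnion, Finset.card_biUnion, hfs]
  · simp only [pvG_card]
    rw [Finset.sum_add_distrib, Finset.sum_const, smul_eq_mul, mul_one,
        List.toFinset_card_of_nodup hnd, List.sum_toFinset _ hnd]
  · intro c _ c' _ hne
    simp only [Finset.disjoint_left]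
    intro x hx hx'
    have h1 := mem_pvG_head hx
    have h2 := mem_pvG_head hx'
    rw [h1] at h2; exact hne (Option.some_injective _ h2)

def pvStep (st : PySem.Dict Char (List (List Char)) × Int) (num : List Char) :
    PySem.Dict Char (List (List Char)) × Int :=
  match num with
  | [] => st
  | c :: rest =>
    if st.1.contains c = false then (st.1.insert c [rest], st.2 + 1)
    else (st.1.modify c [] (fun v => v ++ [rest]), st.2)

lemma pvPairs_cons_nil (ns : List (List Char)) : pvPairs ([] :: ns) = pvPairs ns := rfl

lemma pvPairs_cons (c : Char) (t : List Char) (ns : List (List Char)) :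
    pvPairs ((c :: t) :: ns) = (c, t) :: pvPairs ns := rfl

lemma pv_fold_fst : ∀ (ns : List (List Char)) (d : PySem.Dict Char (List (List Char))) (cnt : Int),
    (ns.foldl pvStep (d, cnt)).1
      = (pvPairs ns).foldl (fun d p => d.modify p.1 [] (fun v => v ++ [p.2])) d := by
  intro ns
  induction ns with
  | nil => intro d cnt; rfl
  | cons s ns ih =>
    intro d cnt
    match s with
    | [] => rw [List.foldl_cons]; exact ih d cnt
    | c :: t =>
      rw [List.foldl_cons, pvPairs_cons, List.foldl_cons]
      show (ns.foldl pvStep (pvStep (d, cnt) (c :: t))).1 = _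
      rw [pvStep]
      split
      · next h =>
        rw [ih]
        congr 1
        rw [PySem.Dict.modify, PySem.Dict.getD_of_not_contains _ _ h]
        rfl
      · exact ih _ _

lemma pv_fold_snd : ∀ (ns : List (List Char)) (d : PySem.Dict Char (List (List Char))) (cnt : Int),
    (ns.foldl pvStep (d, cnt)).2
      = cnt + ((PySem.Set.update d.keys (pvHeads ns)).length : Int) - (d.keys.length : Int) := by
  intro ns
  induction ns with
  | nil => intro d cnt; simp [pvHeads, pvPairs, PySem.Set.update]
  | cons s ns ih =>
    intro d cnt
    match s with
    | [] =>
      rw [List.foldl_cons]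
      show (ns.foldl pvStep (d, cnt)).2 = _
      rw [ih]
      rfl
    | c :: t =>
      have hheads : pvHeads ((c :: t) :: ns) = c :: pvHeads ns := rfl
      rw [List.foldl_cons, hheads, PySem.Set.update_cons]
      show (ns.foldl pvStep (pvStep (d, cnt) (c :: t))).2 = _
      rw [pvStep]
      split
      · next h =>
        rw [ih]
        have hkeys : ((d.insert c [t]).keys) = d.keys ++ [c] :=
          PySem.Dict.keys_insert_of_not_contains d _ h
        have hmem : c ∉ d.keys := fun hm =>
          by rw [(PySem.Dict.contains_iff_mem_keys d c).mpr hm] at h; simp at h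
        rw [hkeys, PySem.Set.add_of_not_mem hmem]
        simp only [List.length_append, List.length_cons, List.length_nil]
        push_cast
        ring
      · next h =>
        rw [ih]
        have hc : d.contains c = true := by simpa using h
        have hmem : c ∈ d.keys := (PySem.Dict.contains_iff_mem_keys d c).mp hc
        have hkeys : ((d.modify c [] (fun v => v ++ [t])).keys) = d.keys := by
          rw [PySem.Dict.keys_modify, PySem.Dict.keys_insert_of_contains _ _ hc]
        rw [hkeys, PySem.Set.add_of_mem hmem]

lemma pv_sumLen_pairs : ∀ ns : List (List Char),
    pvSumLen ((pvPairs ns).map (·.2)) + (pvPairs ns).length ≤ pvSumLen ns := by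
  intro ns
  induction ns with
  | nil => simp [pvSumLen, pvPairs]
  | cons s ns ih =>
    match s with
    | [] =>
      rw [pvPairs_cons_nil]
      calc pvSumLen ((pvPairs ns).map (·.2)) + (pvPairs ns).length ≤ pvSumLen ns := ih
        _ ≤ pvSumLen ([] :: ns) := by simp [pvSumLen]
    | c :: t =>
      rw [pvPairs_cons]
      simp only [pvSumLen, List.map_cons, List.sum_cons, List.length_cons] at *
      omega

lemma pv_group_sublist (ns : List (List Char)) (c : Char) :
    List.Sublist (pvGroup ns c) ((pvPairs ns).map (·.2)) :=
  List.Sublist.map _ List.filter_sublist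

lemma pv_sumLen_group_lt (ns : List (List Char)) (c : Char) (h : c ∈ pvHeads ns) :
    pvSumLen (pvGroup ns c) < pvSumLen ns := by
  obtain ⟨p, hp, he⟩ := List.mem_map.mp h
  have h1 : pvSumLen (pvGroup ns c) ≤ pvSumLen ((pvPairs ns).map (·.2)) := by
    unfold pvSumLen
    exact ((pv_group_sublist ns c).map _).sum_le_sum (by simp)
  have h2 := pv_sumLen_pairs ns
  have h3 : (pvPairs ns).length ≥ 1 := List.length_pos_of_mem hp
  omega

lemma pvPfxs_nil_mem : pvPfxs [([] : List Char)] = ∅ := by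
  simp [pvPfxs, pvPfx]

lemma pvCountA_eq (fuel : Nat) :
    ∀ (ns : List (List Char)) (c : Int), pvSumLen ns < fuel →
      pvCountA fuel ns c = c + ((pvPfxs ns).card : Int) := by
  induction fuel with
  | zero => intro ns c h; omega
  | succ fuel ih =>
    intro ns c hlt
    show (let st := ns.foldl _ (PySem.Dict.empty, c);
          st.1.items.foldl
            (fun cnt kv => if kv.2 ≠ [([] : List Char)] then cnt + pvCountA fuel kv.2 0 else cnt)
            st.2) = _
    have hstep : (fun (st : PySem.Dict Char (List (List Char)) × Int) (num : List Char) =>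
        match num with
        | [] => st
        | c :: rest =>
          if st.1.contains c = false then (st.1.insert c [rest], st.2 + 1)
          else (st.1.modify c [] (fun v => v ++ [rest]), st.2)) = pvStep := rfl
    rw [hstep]
    set D := (pvPairs ns).foldl (fun d p => d.modify p.1 [] (fun v => v ++ [p.2]))
      (PySem.Dict.empty : PySem.Dict Char (List (List Char))) with hD
    have hfst : (ns.foldl pvStep (PySem.Dict.empty, c)).1 = D := pv_fold_fst ns _ c
    have hsnd : (ns.foldl pvStep (PySem.Dict.empty, c)).2
        = c + ((PySem.Set.ofList (pvHeads ns)).length : Int) := by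
      rw [pv_fold_snd ns _ c]
      simp [PySem.Set.update_nil_left]
    have hkeys : D.keys = PySem.Set.ofList (pvHeads ns) := by
      rw [hD, PySem.Dict.keys_foldl_modify_key (pvPairs ns) (·.1) [] (fun _ p v => v ++ [p.2])]
      simp [PySem.Set.update_nil_left, pvHeads]
    have hnodup : D.keys.Nodup := by
      rw [hkeys]; exact PySem.Set.nodup_ofList _
    have hgetD : ∀ k, D.getD k [] = pvGroup ns k := by
      intro k
      rw [hD, PySem.Dict.getD_foldl_modify_append]
      simp [pvGroup]
    have hitems : D.items = D.keys.map (fun k => (k, pvGroup ns k)) := by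
      rw [PySem.Dict.items_eq_map_keys D hnodup []]
      exact List.map_congr_left (fun k _ => by rw [hgetD])
    show List.foldl _ (List.foldl pvStep (PySem.Dict.empty, c) ns).2 (List.foldl pvStep (PySem.Dict.empty, c) ns).1.items = _
    rw [hfst, hsnd, hitems, List.foldl_map]
    have hbody : (fun (cnt : Int) (k : Char) =>
        if (k, pvGroup ns k).2 ≠ [([] : List Char)] then cnt + pvCountA fuel (k, pvGroup ns k).2 0 else cnt)
        = (fun (cnt : Int) (k : Char) =>
            cnt + (if pvGroup ns k ≠ [([] : List Char)] then pvCountA fuel (pvGroup ns k) 0 else 0)) := by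
      funext cnt k
      by_cases h : pvGroup ns k ≠ [([] : List Char)] <;> simp [h]
    rw [hbody, PySem.List.foldl_add, hkeys]
    have hmapeq : (PySem.Set.ofList (pvHeads ns)).map
          (fun k => if pvGroup ns k ≠ [([] : List Char)] then pvCountA fuel (pvGroup ns k) 0 else 0)
        = (PySem.Set.ofList (pvHeads ns)).map (fun k => ((pvPfxs (pvGroup ns k)).card : Int)) := by
      apply List.map_congr_left
      intro k hk
      have hkh : k ∈ pvHeads ns := (PySem.Set.mem_ofList _ _).mp hk
      by_cases hg : pvGroup ns k = [([] : List Char)]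
      · simp [hg, pvPfxs_nil_mem]
      · rw [if_pos hg]
        have hfuel : pvSumLen (pvGroup ns k) < fuel := by
          have h1 := pv_sumLen_group_lt ns k hkh
          omega
        rw [ih _ 0 hfuel]
        ring
    rw [hmapeq]
    have hcast : ((PySem.Set.ofList (pvHeads ns)).map (fun k => ((pvPfxs (pvGroup ns k)).card : Int))).sum
        = (((PySem.Set.ofList (pvHeads ns)).map (fun k => (pvPfxs (pvGroup ns k)).card)).sum : Int) := by
      rw [Nat.cast_list_sum, List.map_map]
      rfl
    rw [hcast]
    have := pvPfxs_card ns
    omega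

lemma pvAlt_eq (numbers : List String) (count : Int) :
    count_elements_rec_alt numbers count
      = count + ((pvPfxs (numbers.map String.toList)).card : Int) := by
  rw [count_elements_rec_alt]
  congr 1
  set L := numbers.flatMap (fun n =>
      (PySem.List.pyRange 1 (PySem.Str.len n + 1)).map
        (fun i => PySem.List.slice n.toList none (some i))) with hL
  have hnd := PySem.Set.nodup_ofList (xs := L)
  have hcard : (PySem.Set.ofList L).toFinset.card = (PySem.Set.ofList L).length :=
    List.toFinset_card_of_nodup hnd
  have hset : (PySem.Set.ofList L).toFinset = pvPfxs (numbers.map String.toList) := by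
    ext x
    rw [List.mem_toFinset, PySem.Set.mem_ofList, mem_pvPfxs, hL]
    simp only [List.mem_flatMap, List.mem_map]
    constructor
    · rintro ⟨n, hn, i, hi, rfl⟩
      rw [PySem.List.mem_pyRange_one, PySem.Str.len_eq] at hi
      rw [PySem.List.slice_to _ (by omega)]
      have h1 : 1 ≤ i.toNat := by omega
      have h2 : i.toNat ≤ n.toList.length := by omega
      refine ⟨?_, n.toList, ⟨n, hn, rfl⟩, List.take_prefix _ _⟩
      intro h
      rcases List.take_eq_nil_iff.mp h with h' | h'
      · omega
      · rw [h'] at h2; simp at h2; omega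
    · rintro ⟨hne, s, hs, hp⟩
      obtain ⟨n, hn, rfl⟩ := hs
      have hlen : x.length ≠ 0 := by simpa [List.length_eq_zero_iff] using hne
      refine ⟨n, hn, (x.length : Int), ?_, ?_⟩
      · rw [PySem.List.mem_pyRange_one, PySem.Str.len_eq]
        have := hp.length_le
        omega
      · rw [PySem.List.slice_to _ (by omega)]
        simp [← List.prefix_iff_eq_take.mp hp]
  rw [← hset, hcard]

-- ===== VERDICT (by name: the statement is the Claim_ definition above) =====
theorem count_elements_rec_spec : Claim_equal_count_elements_rec := by
  intro numbers count _
  show count_elements_rec numbers count = count_elements_rec_alt numbers count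
  rw [count_elements_rec, pvCountA_eq _ _ _ (Nat.lt_succ_self _), pvAlt_eq]
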